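-- pv_equiv track=rewrite | github.com/TEIREN/TEIREN_WEB_APP | filter/rawdata.py | traffic_by_interface_fortigate
-- ===== SOURCE A (Python) =====
-- from collections import defaultdict, Counter
--
-- def traffic_by_interface_fortigate(logs):
--     traffic_by_interface = defaultdict(lambda: {'sent': 0, 'received': 0})
--     for hit in logs:
--         log = hit['_source']
--         srcintf = log.get('srcintf', 'Unknown')  # srcintf 필드 사용
--         dstintf = log.get('dstintf', 'Unknown')  # dstintf 필드 사용
--         sent_byte = int(log.get('sentbyte', 0))  # sentbyte 필드 사용
--         rcvd_byte = int(log.get('rcvdbyte', 0))  # rcvdbyte 필드 사용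
--         traffic_by_interface[srcintf]['sent'] += sent_byte
--         traffic_by_interface[dstintf]['received'] += rcvd_byte
--     return traffic_by_interface
-- ===== SOURCE B (Python) =====
-- def traffic_by_interface_fortigate(logs):
--     # Parse every log once into flat rows, then compute each interface's totals
--     # by summing over the rows (first-touch key order).
--     rows = []
--     for hit in logs:
--         log = hit['_source']
--         rows.append((log.get('srcintf', 'Unknown'),
--                      log.get('dstintf', 'Unknown'),
--                      int(log.get('sentbyte', 0)),
--                      int(log.get('rcvdbyte', 0))))
--     keys = []
--     for s, d, _, _ in rows:
--         if s not in keys: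
--             keys.append(s)
--         if d not in keys:
--             keys.append(d)
--     return {k: {'sent': sum(sb for s, _, sb, _ in rows if s == k),
--                 'received': sum(rb for _, d, _, rb in rows if d == k)}
--             for k in keys}
-- ===== Notes on version B (the rewrite author's own statement) =====
-- stated objective: alternative
-- what changed: A makes a single pass accumulating into a nested defaultdict updated in place; B first parses logs into flat rows, collects the first-touch key order, and then computes each interface's totals by a per-key summation over the rows (no running tally at all); B returns a plain dict whose content equals A's defaultdict. Pre_ excludes inputs where A raises: hits without a '_source' key (KeyError) or sentbyte/rcvdbyte values int() rejects (ValueError).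
-- outside the precondition, e.g. on traffic_by_interface_fortigate([{'_source': {'sentbyte': '0x10'}}]): A raises ValueError, B raises ValueError; on traffic_by_interface_fortigate([{}]): A raises KeyError, B raises KeyError
import Mathlib
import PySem

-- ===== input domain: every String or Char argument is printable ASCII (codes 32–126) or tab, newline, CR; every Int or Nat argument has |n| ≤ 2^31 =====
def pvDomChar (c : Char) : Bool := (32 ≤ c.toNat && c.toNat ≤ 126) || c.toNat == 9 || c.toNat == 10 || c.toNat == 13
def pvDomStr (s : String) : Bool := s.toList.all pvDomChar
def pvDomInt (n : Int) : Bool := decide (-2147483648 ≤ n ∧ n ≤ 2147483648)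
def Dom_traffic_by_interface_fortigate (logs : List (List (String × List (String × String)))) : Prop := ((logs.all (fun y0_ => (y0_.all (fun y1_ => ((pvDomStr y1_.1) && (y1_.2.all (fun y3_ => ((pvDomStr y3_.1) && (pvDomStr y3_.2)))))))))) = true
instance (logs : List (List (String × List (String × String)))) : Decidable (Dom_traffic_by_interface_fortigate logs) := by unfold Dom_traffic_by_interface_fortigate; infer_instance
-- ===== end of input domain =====

-- B replaces A's single-pass nested-defaultdict accumulation by: parse logs once into flat
-- rows, collect the first-touch key order, then compute each interface's totals by a per-key
-- summation over the rows (alternative decomposition; no running tally). B returns a plain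
-- dict with the same content; the defaultdict's missing-key autovivification is not reproduced.


-- int(log.get(key, 0)): missing key → int(0) = 0; present → int(string).
-- Where Python's int() raises ValueError the port returns 0; Pre_ excludes those inputs.
def pvToInt (o : Option String) : Int :=
  match o with
  | none => 0
  | some s => (PySem.Int.ofStr? s).getD 0

-- ===== PORT A =====
def pvDefaultEntry : PySem.Dict String Int := PySem.Dict.mk [("sent", 0), ("received", 0)]

-- defaultdict access tbi[k] followed by inner ['sent'] += … is Dict.modify with pvDefaultEntry
def pvStepA (d : PySem.Dict String (PySem.Dict String Int))
    (hit : List (String × List (String × String))) :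
    PySem.Dict String (PySem.Dict String Int) :=
  -- hit['_source']: KeyError when absent (excluded by Pre_); totalised to {}
  let log := PySem.Dict.mk (((PySem.Dict.mk hit).get? "_source").getD [])
  let srcintf := log.getD "srcintf" "Unknown"
  let dstintf := log.getD "dstintf" "Unknown"
  let sent_byte := pvToInt (log.get? "sentbyte")
  let rcvd_byte := pvToInt (log.get? "rcvdbyte")
  let d := d.modify srcintf pvDefaultEntry (fun m => m.modify "sent" 0 (· + sent_byte))
  d.modify dstintf pvDefaultEntry (fun m => m.modify "received" 0 (· + rcvd_byte))

def traffic_by_interface_fortigate (logs : List (List (String × List (String × String)))) : List (String × List (String × Int)) :=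
  let tbi := logs.foldl pvStepA PySem.Dict.empty
  tbi.items.map (fun p => (p.1, p.2.items))

-- ===== PORT B =====
-- one parsed row: (srcintf, dstintf, sentbyte, rcvdbyte)
def pvParse (hit : List (String × List (String × String))) : String × String × Int × Int :=
  let log := PySem.Dict.mk (((PySem.Dict.mk hit).get? "_source").getD [])
  (log.getD "srcintf" "Unknown", log.getD "dstintf" "Unknown",
   pvToInt (log.get? "sentbyte"), pvToInt (log.get? "rcvdbyte"))

-- the 'if s not in keys: keys.append(s)' / dstintf loop body
def pvAddKeys (ks : List String) (r : String × String × Int × Int) : List String :=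
  let ks := if r.1 ∈ ks then ks else ks ++ [r.1]
  if r.2.1 ∈ ks then ks else ks ++ [r.2.1]

-- sum(sb for s, _, sb, _ in rows if s == k)
def pvSent (rows : List (String × String × Int × Int)) (k : String) : Int :=
  ((rows.filter (fun r => r.1 == k)).map (fun r => r.2.2.1)).sum

-- sum(rb for _, d, _, rb in rows if d == k)
def pvRcvd (rows : List (String × String × Int × Int)) (k : String) : Int :=
  ((rows.filter (fun r => r.2.1 == k)).map (fun r => r.2.2.2)).sum

def traffic_by_interface_fortigate_alt (logs : List (List (String × List (String × String)))) : List (String × List (String × Int)) :=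
  let rows := logs.map pvParse
  let keys := rows.foldl pvAddKeys []
  keys.map (fun k => (k, [("sent", pvSent rows k), ("received", pvRcvd rows k)]))

-- ===== PRECONDITION & SPEC =====
-- Pre_ excludes exactly the inputs where Python A raises: a hit without a '_source' key
-- (KeyError) or a 'sentbyte'/'rcvdbyte' value that int() rejects (ValueError).
def Pre_traffic_by_interface_fortigate (logs : List (List (String × List (String × String)))) : Prop :=
  (logs.all (fun hit =>
    match (PySem.Dict.mk hit).get? "_source" with
    | none => false
    | some log =>
        (((PySem.Dict.mk log).get? "sentbyte").all (fun s => (PySem.Int.ofStr? s).isSome)) &&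
        (((PySem.Dict.mk log).get? "rcvdbyte").all (fun s => (PySem.Int.ofStr? s).isSome)))) = true
instance (logs : List (List (String × List (String × String)))) : Decidable (Pre_traffic_by_interface_fortigate logs) := by unfold Pre_traffic_by_interface_fortigate; infer_instance

def pvWitness_traffic_by_interface_fortigate : (List (List (String × List (String × String)))) :=
  [[("_source", [("srcintf", "port1"), ("dstintf", "wan1"), ("sentbyte", "10"), ("rcvdbyte", "3")])],
   [("_source", [("srcintf", "port1"), ("sentbyte", " 7 ")])]]

def Spec_traffic_by_interface_fortigate (logs : List (List (String × List (String × String)))) (out : List (String × List (String × Int))) : Prop := out = traffic_by_interface_fortigate_alt logs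
instance (logs : List (List (String × List (String × String)))) (out : List (String × List (String × Int))) : Decidable (Spec_traffic_by_interface_fortigate logs out) := by unfold Spec_traffic_by_interface_fortigate; infer_instance

-- ===== CLAIM (what is proved, stated in full; the proofs are below) =====
def Claim_equal_traffic_by_interface_fortigate : Prop := ∀ (logs : List (List (String × List (String × String)))), Dom_traffic_by_interface_fortigate logs → Pre_traffic_by_interface_fortigate logs → Spec_traffic_by_interface_fortigate logs (traffic_by_interface_fortigate logs)

-- ===== LEMMAS AND PROOFS =====

def pvInner (a b : Int) : PySem.Dict String Int := PySem.Dict.mk [("sent", a), ("received", b)]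

theorem pvInner_sent (a b x : Int) :
    (pvInner a b).modify "sent" 0 (· + x) = pvInner (a + x) b := by
  simp [pvInner, PySem.Dict.modify, PySem.Dict.contains, PySem.Dict.insert, PySem.Dict.getD, PySem.Dict.get?]

theorem pvInner_received (a b x : Int) :
    (pvInner a b).modify "received" 0 (· + x) = pvInner a (b + x) := by
  simp [pvInner, PySem.Dict.modify, PySem.Dict.contains, PySem.Dict.insert, PySem.Dict.getD, PySem.Dict.get?]

-- one A-step written through pvParse
theorem pvStepA_eq (d : PySem.Dict String (PySem.Dict String Int))
    (hit : List (String × List (String × String))) :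
    pvStepA d hit =
      (d.modify (pvParse hit).1 pvDefaultEntry
          (fun m => m.modify "sent" 0 (· + (pvParse hit).2.2.1))).modify (pvParse hit).2.1
        pvDefaultEntry (fun m => m.modify "received" 0 (· + (pvParse hit).2.2.2)) := rfl

theorem pv_keys_step (d : PySem.Dict String (PySem.Dict String Int))
    (k : String) (dflt : PySem.Dict String Int)
    (f : PySem.Dict String Int → PySem.Dict String Int) :
    (d.modify k dflt f).keys = if k ∈ d.keys then d.keys else d.keys ++ [k] := by
  rw [PySem.Dict.keys_modify]
  by_cases hc : k ∈ d.keys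
  · rw [PySem.Dict.keys_insert_of_contains _ _
      (by rw [PySem.Dict.contains_eq_decide_mem_keys]; simpa using hc), if_pos hc]
  · rw [PySem.Dict.keys_insert_of_not_contains _ _
      (by rw [PySem.Dict.contains_eq_decide_mem_keys]; simpa using hc), if_neg hc]

theorem pv_nodup_app (ks : List String) (k : String) (h : ks.Nodup) :
    (if k ∈ ks then ks else ks ++ [k]).Nodup := by
  by_cases hc : k ∈ ks
  · simpa [hc] using h
  · rw [if_neg hc]
    refine List.Nodup.append h (List.nodup_singleton k) ?_
    intro a ha hb
    rw [List.mem_singleton] at hb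
    exact hc (hb ▸ ha)

-- sums over a cons of rows
theorem pvSent_cons (r : String × String × Int × Int)
    (rows : List (String × String × Int × Int)) (k : String) :
    pvSent (r :: rows) k = (if r.1 = k then r.2.2.1 else 0) + pvSent rows k := by
  by_cases h : r.1 = k <;> simp [pvSent, h]

theorem pvRcvd_cons (r : String × String × Int × Int)
    (rows : List (String × String × Int × Int)) (k : String) :
    pvRcvd (r :: rows) k = (if r.2.1 = k then r.2.2.2 else 0) + pvRcvd rows k := by
  by_cases h : r.2.1 = k <;> simp [pvRcvd, h]

-- main invariant: folding A's step from d tracks B's key list and per-key row sums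
theorem pvMain (logs : List (List (String × List (String × String))))
    (d : PySem.Dict String (PySem.Dict String Int)) (fS fR : String → Int)
    (hnd : d.keys.Nodup)
    (hv : ∀ k, d.getD k pvDefaultEntry = pvInner (fS k) (fR k)) :
    (logs.foldl pvStepA d).keys = (logs.map pvParse).foldl pvAddKeys d.keys
    ∧ (logs.foldl pvStepA d).keys.Nodup
    ∧ ∀ k, (logs.foldl pvStepA d).getD k pvDefaultEntry
        = pvInner (fS k + pvSent (logs.map pvParse) k) (fR k + pvRcvd (logs.map pvParse) k) := by
  induction logs generalizing d fS fR with
  | nil =>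
      refine ⟨rfl, hnd, fun k => ?_⟩
      simp [pvSent, pvRcvd, hv k]
  | cons hit rest ih =>
      set r := pvParse hit with hr
      set d' := pvStepA d hit with hd'
      have hkeys' : d'.keys = pvAddKeys d.keys r := by
        rw [hd', pvStepA_eq, pv_keys_step, pv_keys_step, pvAddKeys, ← hr]
      have hnd' : d'.keys.Nodup := by
        rw [hkeys', pvAddKeys]
        exact pv_nodup_app _ _ (pv_nodup_app _ _ hnd)
      have hv' : ∀ k, d'.getD k pvDefaultEntry =
          pvInner (fS k + (if r.1 = k then r.2.2.1 else 0))
                  (fR k + (if r.2.1 = k then r.2.2.2 else 0)) := by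
        intro k
        simp only [hd', pvStepA_eq, ← hr, PySem.Dict.getD_modify]
        split_ifs <;> simp_all [pvInner_sent, pvInner_received]
      obtain ⟨ihk, ihnd, ihv⟩ := ih d'
        (fun k => fS k + (if r.1 = k then r.2.2.1 else 0))
        (fun k => fR k + (if r.2.1 = k then r.2.2.2 else 0)) hnd' hv'
      refine ⟨?_, ihnd, fun k => ?_⟩
      · simpa [hkeys', ← hr] using ihk
      · rw [List.foldl_cons] at *
        rw [ihv k, List.map_cons, pvSent_cons, pvRcvd_cons, ← hr]
        ring_nf

-- ===== VERDICT (by name: the statement is the Claim_ definition above) =====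
theorem traffic_by_interface_fortigate_spec : Claim_equal_traffic_by_interface_fortigate := by
  intro logs _dom _pre
  unfold Spec_traffic_by_interface_fortigate
  unfold traffic_by_interface_fortigate traffic_by_interface_fortigate_alt
  obtain ⟨hk, hnd, hv⟩ := pvMain logs PySem.Dict.empty (fun _ => 0) (fun _ => 0)
    (by simp [PySem.Dict.keys_empty])
    (fun k => by rw [PySem.Dict.getD_empty]; rfl)
  simp only
  rw [PySem.Dict.items_eq_map_keys _ hnd pvDefaultEntry, hk]
  simp only [PySem.Dict.keys_empty] at *
  rw [List.map_map]
  refine List.map_congr_left (fun k _ => ?_)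
  simp [Function.comp, hv k, pvInner]
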